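-- pv_equiv track=rewrite | github.com/wzygxr/shuati | class173_SqrtDecompositionAndMoAlgorithm/subset_enumeration.py | enumerate_subsets_with_required
-- ===== SOURCE A (Python) =====
-- def enumerate_subsets_with_required(mask, required_elements):
--     """
--     枚举包含特定元素的子集
--
--     Args:
--         mask: 原集合的位掩码
--         required_elements: 必须包含的元素的位掩码
--
--     Returns:
--         list: 包含所有required_elements的子集的位掩码列表
--     """
--     subsets = []
--
--     # 检查required_elements是否是mask的子集
--     if (required_elements & mask) != required_elements:
--         return subsets  # required_elements包含mask中没有的元素
--
--     # 枚举所有包含required_elements的子集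
--     remaining = mask & (~required_elements)
--     sub = remaining
--     while True:
--         subsets.append(sub | required_elements)
--         if sub == 0:
--             break
--         sub = (sub - 1) & remaining
--
--     return subsets
-- ===== SOURCE B (Python) =====
-- def enumerate_subsets_with_required(mask, required_elements):
--     """Same result as A: recursion over the set-bit positions of mask & ~required_elements
--     (highest bit first, include-before-exclude) instead of the submask-decrement loop."""
--     if (required_elements & mask) != required_elements:
--         return []
--     remaining = mask & (~required_elements)
--     bits = []
--     r = remaining
--     while r > 0:
--         h = r.bit_length() - 1
--         bits.append(h)
--         r -= 1 << h
--     def gen(i, acc):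
--         if i == len(bits):
--             return [acc | required_elements]
--         return gen(i + 1, acc | (1 << bits[i])) + gen(i + 1, acc)
--     return gen(0, 0)
-- ===== Notes on version B (the rewrite author's own statement) =====
-- stated objective: alternative
-- what changed: Replaced the submask-decrement loop (sub = (sub-1) & remaining) with a recursion over the set-bit positions of remaining collected highest-first, branching include-before-exclude, which emits the same submasks in the same strictly decreasing order.
import Mathlib
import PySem

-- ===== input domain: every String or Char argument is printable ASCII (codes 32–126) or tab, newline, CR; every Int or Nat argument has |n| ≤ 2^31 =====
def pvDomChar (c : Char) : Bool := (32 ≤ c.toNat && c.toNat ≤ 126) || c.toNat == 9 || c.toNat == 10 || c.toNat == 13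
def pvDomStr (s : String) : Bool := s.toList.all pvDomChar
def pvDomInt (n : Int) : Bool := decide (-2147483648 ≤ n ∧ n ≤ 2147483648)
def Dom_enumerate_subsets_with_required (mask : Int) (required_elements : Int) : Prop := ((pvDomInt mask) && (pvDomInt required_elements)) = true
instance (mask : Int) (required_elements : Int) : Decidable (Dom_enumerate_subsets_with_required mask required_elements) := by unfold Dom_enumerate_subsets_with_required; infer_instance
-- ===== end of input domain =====

-- B enumerates the subsets by recursion over the set-bit positions of mask & ~required_elements
-- (highest bit first, include-before-exclude) instead of A's submask-decrement loop; same output order.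

-- ===== PORT A =====
-- the 'while True' loop of A; fuel = remaining.toNat + 1 strictly bounds the number of
-- iterations whenever remaining ≥ 0 (sub strictly decreases and stays ≥ 0), so the port
-- computes exactly what A computes on every input admitted by Pre_.
def pvLoopA (required_elements remaining : Int) : Nat → Int → List Int
  | 0, _ => []
  | f + 1, sub =>
      PySem.Int.bor sub required_elements ::
        (if sub = 0 then [] else pvLoopA required_elements remaining f (PySem.Int.band (sub - 1) remaining))

def enumerate_subsets_with_required (mask : Int) (required_elements : Int) : List Int :=
  if PySem.Int.band required_elements mask ≠ required_elements then []
  else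
    let remaining := PySem.Int.band mask (Int.not required_elements)
    pvLoopA required_elements remaining (remaining.toNat + 1) remaining

-- ===== PORT B =====
-- the 'while r > 0' loop collecting bit positions (highest first); for r ≤ 0 the Python loop
-- body never runs, and correspondingly the port receives remaining.toNat = 0 and returns [].
def pvBitsB (r : Nat) : List Nat :=
  if hr : r = 0 then []
  else
    let h := PySem.Int.bitLength (r : Int) - 1   -- r.bit_length() - 1
    h :: pvBitsB (r - 2 ^ h)
decreasing_by
  have hp : 0 < 2 ^ (PySem.Int.bitLength (r : Int) - 1) := Nat.two_pow_pos _
  omega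

-- the nested recursive 'gen' of B (index i ↔ the suffix bits[i:])
def pvGenB (required_elements : Int) : List Nat → Int → List Int
  | [], acc => [PySem.Int.bor acc required_elements]
  | b :: bs, acc =>
      pvGenB required_elements bs (PySem.Int.bor acc ((1 : Int) <<< b)) ++ pvGenB required_elements bs acc

def enumerate_subsets_with_required_alt (mask : Int) (required_elements : Int) : List Int :=
  if PySem.Int.band required_elements mask ≠ required_elements then []
  else
    let remaining := PySem.Int.band mask (Int.not required_elements)
    pvGenB required_elements (pvBitsB remaining.toNat) 0

-- ===== PRECONDITION & SPEC =====
-- Pre_ excludes exactly the inputs where A never returns: if required_elements ⊆ mask but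
-- remaining = mask & ~required_elements is negative, A's submask-decrement loop never reaches
-- 0 (Python ints are unbounded two's complement) and A diverges.
def Pre_enumerate_subsets_with_required (mask : Int) (required_elements : Int) : Prop :=
  PySem.Int.band required_elements mask = required_elements →
    0 ≤ PySem.Int.band mask (Int.not required_elements)
instance (mask : Int) (required_elements : Int) : Decidable (Pre_enumerate_subsets_with_required mask required_elements) := by unfold Pre_enumerate_subsets_with_required; infer_instance

def pvWitness_enumerate_subsets_with_required : Int × Int := (13, 5)

def Spec_enumerate_subsets_with_required (mask : Int) (required_elements : Int) (out : List Int) : Prop := out = enumerate_subsets_with_required_alt mask required_elements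
instance (mask : Int) (required_elements : Int) (out : List Int) : Decidable (Spec_enumerate_subsets_with_required mask required_elements out) := by unfold Spec_enumerate_subsets_with_required; infer_instance

-- ===== CLAIM (what is proved, stated in full; the proofs are below) =====
def Claim_equal_enumerate_subsets_with_required : Prop := ∀ (mask : Int) (required_elements : Int), Dom_enumerate_subsets_with_required mask required_elements → Pre_enumerate_subsets_with_required mask required_elements → Spec_enumerate_subsets_with_required mask required_elements (enumerate_subsets_with_required mask required_elements)

-- ===== LEMMAS AND PROOFS =====

-- Nat-level skeleton of A's loop: the sequence of 'sub' values (fuel-indexed, like the port)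
def pvChain (r : Nat) : Nat → Nat → List Nat
  | 0, _ => []
  | _ + 1, 0 => [0]
  | f + 1, s + 1 => (s + 1) :: pvChain r f (s &&& r)

-- Nat-level skeleton of B's gen
def pvGenN : List Nat → Nat → List Nat
  | [], acc => [acc]
  | b :: bs, acc => pvGenN bs (acc ||| 2 ^ b) ++ pvGenN bs acc

theorem pvChain_fuel (r : Nat) : ∀ s f, s ≤ f → pvChain r (f + 1) s = pvChain r (s + 1) s := by
  intro s
  induction s using Nat.strong_induction_on with
  | _ s ih =>
    intro f hf
    match s, f with
    | 0, f => rfl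
    | s + 1, f + 1 =>
      have h1 : s &&& r ≤ s := Nat.and_le_left
      simp only [pvChain]
      rw [ih (s &&& r) (by omega) f (by omega), ih (s &&& r) (by omega) s (by omega)]

def pvChainN (r s : Nat) : List Nat := pvChain r (s + 1) s

theorem pvChainN_succ (r s : Nat) : pvChainN r (s + 1) = (s + 1) :: pvChainN r (s &&& r) := by
  have h1 : s &&& r ≤ s := Nat.and_le_left
  show pvChain r (s + 2) (s + 1) = _
  simp only [pvChain]
  congr 1
  exact pvChain_fuel r (s &&& r) (s + 1 - 1) (by omega)

-- bit facts
theorem pv_testBit_pow_add (h m i : Nat) (hm : m < 2 ^ h) :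
    (2 ^ h + m).testBit i = (if i = h then true else m.testBit i) := by
  rcases lt_trichotomy i h with hi | hi | hi
  · simp [hi.ne, Nat.testBit_two_pow_add_gt hi m]
  · subst hi
    simp [Nat.testBit_two_pow_add_eq, Nat.testBit_lt_two_pow hm]
  · have h1 : 2 ^ h + m < 2 ^ i := by
      calc 2 ^ h + m < 2 ^ h + 2 ^ h := by omega
        _ = 2 ^ (h + 1) := by ring
        _ ≤ 2 ^ i := Nat.pow_le_pow_right (by norm_num) hi
    have h2 : m < 2 ^ i := by omega
    simp [hi.ne', Nat.testBit_lt_two_pow h1, Nat.testBit_lt_two_pow h2]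

theorem pvI1 (h a m : Nat) (ha : a < 2 ^ h) (hm : m < 2 ^ h) :
    a &&& (2 ^ h + m) = a &&& m := by
  apply Nat.eq_of_testBit_eq
  intro i
  simp only [Nat.testBit_and, pv_testBit_pow_add h m i hm]
  by_cases hi : i = h
  · subst hi; simp [Nat.testBit_lt_two_pow ha]
  · simp [hi]

theorem pvI2 (h a m : Nat) (ha : a < 2 ^ h) (hm : m < 2 ^ h) :
    (2 ^ h + a) &&& (2 ^ h + m) = 2 ^ h + (a &&& m) := by
  have ham : a &&& m < 2 ^ h := lt_of_le_of_lt Nat.and_le_left ha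
  apply Nat.eq_of_testBit_eq
  intro i
  simp only [Nat.testBit_and, pv_testBit_pow_add h _ i ha, pv_testBit_pow_add h _ i hm,
    pv_testBit_pow_add h _ i ham]
  by_cases hi : i = h <;> simp [hi]

theorem pvI3 (h m : Nat) (hm : m < 2 ^ h) : (2 ^ h - 1) &&& m = m := by
  rw [Nat.land_comm, Nat.and_two_pow_sub_one_eq_mod, Nat.mod_eq_of_lt hm]

theorem pvI4 (h x : Nat) (hx : x < 2 ^ h) : 2 ^ h ||| x = 2 ^ h + x := by
  apply Nat.eq_of_testBit_eq
  intro i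
  simp only [Nat.testBit_or, pv_testBit_pow_add h x i hx, Nat.testBit_two_pow]
  by_cases hi : i = h
  · simp [hi]
  · simp [hi, Ne.symm hi]

-- A's chain ignores the high bit of 'remaining' while 'sub' stays below it
theorem pvL1 (h m : Nat) (hm : m < 2 ^ h) :
    ∀ s, s < 2 ^ h → pvChainN (2 ^ h + m) s = pvChainN m s := by
  intro s
  induction s using Nat.strong_induction_on with
  | _ s ih =>
    intro hs
    match s with
    | 0 => rfl
    | s + 1 =>
      have hand : s &&& m ≤ s := Nat.and_le_left
      rw [pvChainN_succ, pvChainN_succ]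
      rw [pvI1 h s m (by omega) hm]
      rw [ih (s &&& m) (by omega) (by omega)]

-- the split: the chain of 2^h+m from 2^h+s is the shifted chain of m from s, then the chain of m
theorem pvL2 (h m : Nat) (hm : m < 2 ^ h) :
    ∀ s, s < 2 ^ h →
      pvChainN (2 ^ h + m) (2 ^ h + s) = (pvChainN m s).map (2 ^ h + ·) ++ pvChainN m m := by
  intro s
  induction s using Nat.strong_induction_on with
  | _ s ih =>
    intro hs
    match s with
    | 0 =>
      have hp : 0 < 2 ^ h := Nat.two_pow_pos h
      rw [show 2 ^ h + 0 = (2 ^ h - 1) + 1 from by omega, pvChainN_succ]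
      rw [show (2 ^ h - 1) &&& (2 ^ h + m) = m from by
        rw [pvI1 h (2 ^ h - 1) m (by omega) hm, pvI3 h m hm]]
      rw [pvL1 h m hm m hm]
      simp [pvChainN, pvChain]
      omega
    | s + 1 =>
      have hand : s &&& m ≤ s := Nat.and_le_left
      rw [show 2 ^ h + (s + 1) = (2 ^ h + s) + 1 from rfl, pvChainN_succ]
      rw [pvI2 h s m (by omega) hm]
      rw [ih (s &&& m) (by omega) (by omega)]
      rw [pvChainN_succ]
      simp [Nat.add_assoc]

-- gen with a seed accumulator is the seedless gen with the seed or-ed on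
theorem pvGenN_shift : ∀ (bs : List Nat) (c : Nat), pvGenN bs c = (pvGenN bs 0).map (c ||| ·) := by
  intro bs
  induction bs with
  | nil => intro c; simp [pvGenN]
  | cons b bs ih =>
    intro c
    simp only [pvGenN, ih (c ||| 2 ^ b), ih (0 ||| 2 ^ b), ih c, List.map_append, List.map_map]
    congr 1
    apply List.map_congr_left
    intro x _
    simp [Function.comp, Nat.zero_or, Nat.lor_assoc]

-- every element of the chain starting at a submask value s ≤ m stays ≤ m
theorem pvChainN_le (m : Nat) : ∀ s, s ≤ m → ∀ x ∈ pvChainN m s, x ≤ m := by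
  intro s
  induction s using Nat.strong_induction_on with
  | _ s ih =>
    intro hs x hx
    match s with
    | 0 => simp [pvChainN, pvChain] at hx; omega
    | s + 1 =>
      rw [pvChainN_succ] at hx
      rcases List.mem_cons.mp hx with h1 | h1
      · omega
      · have hand : s &&& m ≤ s := Nat.and_le_left
        have hand2 : s &&& m ≤ m := Nat.and_le_right
        exact ih (s &&& m) (by omega) hand2 x h1

-- the core correspondence: A's submask chain = B's bit recursion, at the Nat level
theorem pvMain (r : Nat) : pvChainN r r = pvGenN (pvBitsB r) 0 := by
  induction r using Nat.strong_induction_on with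
  | _ r ih =>
    match r with
    | 0 =>
      have : pvBitsB 0 = [] := by rw [pvBitsB]; simp
      simp [pvChainN, pvChain, pvGenN, this]
    | n + 1 =>
      set r := n + 1 with hrdef
      have hrne : r ≠ 0 := by omega
      set h := PySem.Int.bitLength (r : Int) - 1 with hh
      have hbl : r < 2 ^ PySem.Int.bitLength (r : Int) := by
        have := PySem.Int.lt_two_pow_bitLength (r : Int)
        simpa using this
      have hb1 : 1 ≤ PySem.Int.bitLength (r : Int) := by
        by_contra hc
        have h0 : PySem.Int.bitLength (r : Int) = 0 := by omega
        rw [h0, pow_zero] at hbl; omega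
      have hle : 2 ^ h ≤ r := by
        have hrInt : (r : Int) ≠ 0 := by exact_mod_cast hrne
        have := PySem.Int.two_pow_bitLength_le (r : Int) hrInt
        simpa using this
      have hlt : r - 2 ^ h < 2 ^ h := by
        have : PySem.Int.bitLength (r : Int) = h + 1 := by omega
        rw [this] at hbl
        have : 2 ^ (h + 1) = 2 ^ h + 2 ^ h := by ring
        omega
      set m := r - 2 ^ h with hm
      have hr2 : r = 2 ^ h + m := by have := Nat.two_pow_pos h; omega
      have hbits : pvBitsB r = h :: pvBitsB m := by
        conv_lhs => rw [pvBitsB]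
        simp only [hrne]
        rw [dif_neg not_false, ← hh, ← hm]
      rw [hbits]
      have hmr : m < r := by have := Nat.two_pow_pos h; omega
      rw [hr2]
      rw [pvL2 h m hlt m hlt]
      simp only [pvGenN, Nat.zero_or]
      rw [pvGenN_shift (pvBitsB m) (2 ^ h), ← ih m hmr]
      congr 1
      apply List.map_congr_left
      intro x hx
      have hxle : x ≤ m := pvChainN_le m m le_rfl x hx
      rw [pvI4 h x (by omega)]

-- casting bridges: the Int ports compute the Nat skeletons
theorem pvLoopA_cast (req : Int) (r : Nat) : ∀ (f : Nat) (s : Nat),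
    pvLoopA req (r : Int) f (s : Int) =
      (pvChain r f s).map (fun x : Nat => PySem.Int.bor (x : Int) req) := by
  intro f
  induction f with
  | zero => intro s; simp [pvLoopA, pvChain]
  | succ f ih =>
    intro s
    match s with
    | 0 => simp [pvLoopA, pvChain]
    | s + 1 =>
      have h1 : ¬((s : Int) + 1 = 0) := by omega
      simp [pvLoopA, pvChain, h1, PySem.Int.band_natCast, ih]

theorem pv_one_shl (b : Nat) : ((1 : Int) <<< b) = ((2 ^ b : Nat) : Int) := by
  show Int.shiftLeft 1 b = _
  unfold Int.shiftLeft
  simp [Nat.shiftLeft_eq]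

theorem pvGenB_cast (req : Int) : ∀ (bs : List Nat) (acc : Nat),
    pvGenB req bs (acc : Int) =
      (pvGenN bs acc).map (fun x : Nat => PySem.Int.bor (x : Int) req) := by
  intro bs
  induction bs with
  | nil => intro acc; simp [pvGenB, pvGenN]
  | cons b bs ih =>
    intro acc
    simp only [pvGenB, pvGenN, List.map_append]
    rw [pv_one_shl, PySem.Int.bor_natCast, ih, ih]

-- ===== VERDICT (by name: the statement is the Claim_ definition above) =====
theorem enumerate_subsets_with_required_spec : Claim_equal_enumerate_subsets_with_required := by
  intro mask req hDom hPre
  unfold Spec_enumerate_subsets_with_required enumerate_subsets_with_required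
    enumerate_subsets_with_required_alt
  by_cases hg : PySem.Int.band req mask = req
  · have hrem : 0 ≤ PySem.Int.band mask (Int.not req) := hPre hg
    rw [if_neg (by simp [hg]), if_neg (by simp [hg])]
    obtain ⟨r, hr⟩ : ∃ r : Nat, PySem.Int.band mask (Int.not req) = (r : Int) :=
      ⟨_, (Int.toNat_of_nonneg hrem).symm⟩
    simp only [hr, Int.toNat_natCast]
    rw [pvLoopA_cast req r (r + 1) r]
    rw [show (0 : Int) = ((0 : Nat) : Int) from rfl, pvGenB_cast req (pvBitsB r) 0]
    rw [show pvChain r (r + 1) r = pvChainN r r from rfl, pvMain]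
  · rw [if_pos (by simp [hg]), if_pos (by simp [hg])]
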